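-- pv_equiv track=rewrite | github.com/SCM-NV/nano-qmflows | nac/integrals/nonAdiabaticCoupling.py | create_rows_range
-- ===== SOURCE A (Python) =====
-- from typing import Dict, List, Tuple
--
-- def create_rows_range(nOrbs: int, ncores: int) -> List:
--     """
--     Create a list of indexes for the row of the overlap matrix
--     that will be calculated by a pool of workers.
--     """
--     # Number of rows to compute for each CPU
--     chunk = nOrbs // ncores
--
--     # Remaining entries
--     rest = nOrbs % ncores
--
--     xs = []
--     acc = 0
--     for i in range(ncores):
--         b = 1 if i < rest else 0
--         upper = acc + chunk + b
--         xs.append((acc, upper))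
--         acc = upper
--
--     return xs
-- ===== SOURCE B (Python) =====
-- def create_rows_range(nOrbs: int, ncores: int):
--     """
--     Create a list of indexes for the row of the overlap matrix
--     that will be calculated by a pool of workers.
--     """
--     chunk = nOrbs // ncores
--     rest = nOrbs % ncores
--     # boundary of chunk i in closed form; no running accumulator
--     bounds = [i * chunk + min(i, rest) for i in range(ncores + 1)]
--     return list(zip(bounds, bounds[1:]))
-- ===== Notes on version B (the rewrite author's own statement) =====
-- stated objective: simpler
-- what changed: Replaces the running-accumulator loop with per-index closed-form boundaries i*chunk + min(i, rest) and a zip of consecutive boundaries.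
import Mathlib
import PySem

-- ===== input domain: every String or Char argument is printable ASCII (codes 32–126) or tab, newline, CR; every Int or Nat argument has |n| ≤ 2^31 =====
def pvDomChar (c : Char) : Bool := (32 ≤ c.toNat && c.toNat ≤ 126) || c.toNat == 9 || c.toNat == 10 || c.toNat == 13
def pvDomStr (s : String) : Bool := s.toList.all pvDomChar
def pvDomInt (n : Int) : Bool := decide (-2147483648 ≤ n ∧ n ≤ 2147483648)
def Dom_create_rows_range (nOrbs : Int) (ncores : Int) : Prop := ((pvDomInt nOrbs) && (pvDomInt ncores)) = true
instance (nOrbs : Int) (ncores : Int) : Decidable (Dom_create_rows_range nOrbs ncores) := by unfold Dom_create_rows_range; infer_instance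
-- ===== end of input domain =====

-- B replaces A's running accumulator with the closed-form boundary i*chunk + min(i, rest)
-- and zips consecutive boundaries (objective: simpler decomposition; same cost).

-- ===== PORT A =====
def create_rows_range (nOrbs : Int) (ncores : Int) : List (Int × Int) :=
  let chunk := PySem.Int.floordiv nOrbs ncores
  let rest := PySem.Int.mod nOrbs ncores
  let p := (PySem.List.pyRange 0 ncores 1).foldl
    (fun (s : List (Int × Int) × Int) i =>
      let b : Int := if i < rest then 1 else 0
      let upper := s.2 + chunk + b
      (s.1 ++ [(s.2, upper)], upper)) ([], 0)
  p.1

-- ===== PORT B =====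
def create_rows_range_alt (nOrbs : Int) (ncores : Int) : List (Int × Int) :=
  let chunk := PySem.Int.floordiv nOrbs ncores
  let rest := PySem.Int.mod nOrbs ncores
  let bounds := (PySem.List.pyRange 0 (ncores + 1) 1).map (fun i => i * chunk + min i rest)
  bounds.zip bounds.tail

-- ===== PRECONDITION & SPEC =====
-- Pre_ excludes exactly ncores = 0, where A raises ZeroDivisionError.
def Pre_create_rows_range (nOrbs : Int) (ncores : Int) : Prop := ncores ≠ 0
instance (nOrbs : Int) (ncores : Int) : Decidable (Pre_create_rows_range nOrbs ncores) := by unfold Pre_create_rows_range; infer_instance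
def pvWitness_create_rows_range : Int × Int := (10, 3)

def Spec_create_rows_range (nOrbs : Int) (ncores : Int) (out : List (Int × Int)) : Prop := out = create_rows_range_alt nOrbs ncores
instance (nOrbs : Int) (ncores : Int) (out : List (Int × Int)) : Decidable (Spec_create_rows_range nOrbs ncores out) := by unfold Spec_create_rows_range; infer_instance

-- ===== CLAIM (what is proved, stated in full; the proofs are below) =====
def Claim_equal_create_rows_range : Prop := ∀ (nOrbs : Int) (ncores : Int), Dom_create_rows_range nOrbs ncores → Pre_create_rows_range nOrbs ncores → Spec_create_rows_range nOrbs ncores (create_rows_range nOrbs ncores)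

-- ===== LEMMAS AND PROOFS =====

-- A's loop invariant: folding over range j..n from boundary s(j) appends (s i, s (i+1)) per i.
theorem crr_foldA (chunk rest : Int) :
    ∀ (k : Nat) (j : Int) (pref : List (Int × Int)), 0 ≤ j →
    (PySem.List.pyRange j (j + k) 1).foldl
      (fun (s : List (Int × Int) × Int) i =>
        let b : Int := if i < rest then 1 else 0
        let upper := s.2 + chunk + b
        (s.1 ++ [(s.2, upper)], upper)) (pref, j * chunk + min j rest)
    = (pref ++ (PySem.List.pyRange j (j + k) 1).map
        (fun i => (i * chunk + min i rest, (i + 1) * chunk + min (i + 1) rest)),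
       (j + k) * chunk + min (j + k) rest) := by
  intro k
  induction k with
  | zero =>
    intro j pref hj
    simp
  | succ n ih =>
    intro j pref hj
    rw [PySem.List.pyRange_one_cons (by push_cast; omega : j < j + ((n + 1 : Nat) : Int))]
    simp only [List.foldl_cons, List.map_cons]
    have hstep : j * chunk + min j rest + chunk + (if j < rest then (1 : Int) else 0)
        = (j + 1) * chunk + min (j + 1) rest := by
      split_ifs with h <;> [skip; skip] <;> ring_nf <;> omega
    rw [hstep]
    have := ih (j + 1) (pref ++ [(j * chunk + min j rest, (j + 1) * chunk + min (j + 1) rest)]) (by omega)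
    have harg : j + 1 + (n : Int) = j + ((n + 1 : Nat) : Int) := by push_cast; ring
    rw [harg] at this
    rw [this]
    simp

-- B's shape: zipping a mapped range with its tail pairs consecutive boundaries.
theorem crr_zip (f : Int → Int) :
    ∀ (k : Nat) (j : Int),
    (((PySem.List.pyRange j (j + k + 1) 1).map f).zip ((PySem.List.pyRange j (j + k + 1) 1).map f).tail)
    = (PySem.List.pyRange j (j + k) 1).map (fun i => (f i, f (i + 1))) := by
  intro k
  induction k with
  | zero =>
    intro j
    have e1 : j + ((0 : Nat) : Int) + 1 = j + 1 := by push_cast; ring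
    have e2 : j + ((0 : Nat) : Int) = j := by push_cast; ring
    rw [e1, e2, PySem.List.pyRange_one_singleton, PySem.List.pyRange_one_eq_nil (le_refl j)]
    simp
  | succ n ih =>
    intro j
    have h1 : PySem.List.pyRange j (j + ((n + 1 : Nat) : Int) + 1) 1
        = j :: PySem.List.pyRange (j + 1) (j + ((n + 1 : Nat) : Int) + 1) 1 :=
      PySem.List.pyRange_one_cons (by push_cast; omega)
    have h2 : PySem.List.pyRange j (j + ((n + 1 : Nat) : Int)) 1
        = j :: PySem.List.pyRange (j + 1) (j + ((n + 1 : Nat) : Int)) 1 :=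
      PySem.List.pyRange_one_cons (by push_cast; omega)
    have harg1 : j + ((n + 1 : Nat) : Int) + 1 = (j + 1) + (n : Int) + 1 := by push_cast; ring
    have harg2 : j + ((n + 1 : Nat) : Int) = (j + 1) + (n : Int) := by push_cast; ring
    rw [h1, h2, harg1, harg2]
    have hlt : (j + 1 : Int) < (j + 1) + (n : Int) + 1 := by omega
    have hcons : PySem.List.pyRange (j + 1) ((j + 1) + (n : Int) + 1) 1
        = (j + 1) :: PySem.List.pyRange (j + 1 + 1) ((j + 1) + (n : Int) + 1) 1 :=
      PySem.List.pyRange_one_cons hlt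
    have := ih (j + 1)
    rw [hcons] at this ⊢
    simp only [List.map_cons, List.zip_cons_cons, List.tail_cons] at this ⊢
    rw [this]

-- ===== VERDICT (by name: the statement is the Claim_ definition above) =====
theorem create_rows_range_spec : Claim_equal_create_rows_range := by
  intro nOrbs ncores _ hpre
  simp only [Spec_create_rows_range, create_rows_range, create_rows_range_alt]
  rcases lt_or_gt_of_ne hpre with hneg | hpos
  · -- ncores < 0: both ranges are empty
    rw [PySem.List.pyRange_one_eq_nil (by omega : ncores ≤ 0),
        PySem.List.pyRange_one_eq_nil (by omega : ncores + 1 ≤ 0)]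
    simp
  · -- ncores > 0
    have hr : 0 ≤ PySem.Int.mod nOrbs ncores := PySem.Int.mod_nonneg nOrbs hpos
    obtain ⟨k, hk⟩ : ∃ k : Nat, ncores = (k : Int) := ⟨ncores.toNat, by omega⟩
    have hA := crr_foldA (PySem.Int.floordiv nOrbs ncores) (PySem.Int.mod nOrbs ncores) k 0 [] (le_refl 0)
    have hB := crr_zip (fun i => i * PySem.Int.floordiv nOrbs ncores + min i (PySem.Int.mod nOrbs ncores)) k 0
    simp only [zero_add] at hA hB
    have h0 : (0 : Int) * PySem.Int.floordiv nOrbs ncores + min 0 (PySem.Int.mod nOrbs ncores) = 0 := by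
      simp [min_eq_left hr]
    rw [h0] at hA
    rw [hk] at hA hB ⊢
    rw [hA, hB]
    simp
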